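-- pv_equiv track=rewrite | github.com/supingisme/test | python/github/CppCode-Formatter/CodeFormatter.py | replace_comma
-- ===== SOURCE A (Python) =====
-- def replace_comma(input_str):
--     new_str = ""
--     for idx,c in enumerate(input_str):
--         if c != ',':
--             new_str += c
--         else:
--             if idx>0 and idx<len(input_str)-1 and input_str[idx-1:idx+2]=="\',\'":
--                 new_str += c
--             else:
--                 new_str += ', '
--     return new_str
-- ===== SOURCE B (Python) =====
-- import re
--
-- def replace_comma(input_str):
--     # A comma is left alone only when it sits between two single quotes;
--     # every other comma (not preceded OR not followed by a quote) becomes ", ".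
--     return re.sub(r"(?<!'),|,(?!')", ", ", input_str)
-- ===== Notes on version B (the rewrite author's own statement) =====
-- stated objective: idiomatic
-- what changed: Replaces the index-and-slice character loop with a single regex substitution re.sub(r"(?<!'),|,(?!')", ", ", input_str): zero-width lookaround leaves exactly the quote-enclosed commas unmatched.
import Mathlib
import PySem

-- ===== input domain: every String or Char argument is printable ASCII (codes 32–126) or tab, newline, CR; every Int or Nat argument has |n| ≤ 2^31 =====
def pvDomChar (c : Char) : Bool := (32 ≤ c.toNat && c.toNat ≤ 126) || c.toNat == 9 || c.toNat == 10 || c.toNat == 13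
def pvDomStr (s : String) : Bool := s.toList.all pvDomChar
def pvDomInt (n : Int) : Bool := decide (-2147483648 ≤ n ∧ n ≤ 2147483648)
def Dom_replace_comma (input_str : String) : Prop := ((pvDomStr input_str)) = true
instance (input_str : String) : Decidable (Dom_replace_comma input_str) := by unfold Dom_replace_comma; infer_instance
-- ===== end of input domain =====

-- B replaces A's index-and-slice character loop by a single regex substitution
-- re.sub(r"(?<!'),|,(?!')", ", ", input_str) (objective: idiomatic, same cost).

-- ===== PORT A =====
def replace_comma (input_str : String) : String :=
  let cs := input_str.toList
  String.ofList ((PySem.List.enumerate cs 0).foldl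
    (fun new_str p =>
      if p.2 ≠ ',' then
        new_str ++ [p.2]
      else
        if p.1 > 0 ∧ p.1 < PySem.Str.len input_str - 1 ∧
            PySem.List.slice cs (some (p.1 - 1)) (some (p.1 + 2)) = ['\'', ',', '\''] then
          new_str ++ [p.2]
        else
          new_str ++ [',', ' ']) [])

-- ===== PORT B =====
-- Hand port of re.sub(r"(?<!'),|,(?!')", ", ", s): the regex engine scans left to
-- right; at each position the single-char pattern ',' matches iff the zero-width
-- lookbehind (?<!') or lookahead (?!') admits it (at the string boundaries the
-- lookaround sees no quote and admits). This scan is exact for this pattern.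
def pvSub (prev : Option Char) : List Char → List Char
  | [] => []
  | c :: rest =>
    if c = ',' ∧ (prev ≠ some '\'' ∨ rest.head? ≠ some '\'') then
      ',' :: ' ' :: pvSub (some c) rest
    else
      c :: pvSub (some c) rest

def replace_comma_alt (input_str : String) : String :=
  String.ofList (pvSub none input_str.toList)

-- ===== PRECONDITION & SPEC =====
def Spec_replace_comma (input_str : String) (out : String) : Prop := out = replace_comma_alt input_str
instance (input_str : String) (out : String) : Decidable (Spec_replace_comma input_str out) := by unfold Spec_replace_comma; infer_instance

-- ===== CLAIM (what is proved, stated in full; the proofs are below) =====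
def Claim_equal_replace_comma : Prop := ∀ (input_str : String), Dom_replace_comma input_str → Spec_replace_comma input_str (replace_comma input_str)

-- ===== LEMMAS AND PROOFS =====

-- A's per-character emission, as a function of the whole string and the enumerate entry
def pvEmit (cs : List Char) (p : Int × Char) : List Char :=
  if p.2 ≠ ',' then [p.2]
  else
    if p.1 > 0 ∧ p.1 < (cs.length : Int) - 1 ∧
        PySem.List.slice cs (some (p.1 - 1)) (some (p.1 + 2)) = ['\'', ',', '\''] then
      [p.2]
    else [',', ' ']

lemma pvEmit_fold (cs : List Char) :
    (fun (new_str : List Char) (p : Int × Char) =>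
      if p.2 ≠ ',' then new_str ++ [p.2]
      else
        if p.1 > 0 ∧ p.1 < (cs.length : Int) - 1 ∧
            PySem.List.slice cs (some (p.1 - 1)) (some (p.1 + 2)) = ['\'', ',', '\''] then
          new_str ++ [p.2]
        else new_str ++ [',', ' ']) =
    (fun new_str p => new_str ++ pvEmit cs p) := by
  funext new_str p
  unfold pvEmit
  split_ifs <;> rfl

lemma pvEmit_comma (cs : List Char) (i : Int) :
    pvEmit cs (i, ',') =
      if i > 0 ∧ i < (cs.length : Int) - 1 ∧
          PySem.List.slice cs (some (i - 1)) (some (i + 2)) = ['\'', ',', '\''] then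
        [',']
      else [',', ' '] := by
  simp [pvEmit]

lemma pvEmit_other (cs : List Char) (i : Int) (c : Char) (hc : c ≠ ',') :
    pvEmit cs (i, c) = [c] := by
  simp [pvEmit, hc]

-- A's keep-condition at a comma at position pre.length is exactly "quote before and after"
lemma pvCond (cs pre rest : List Char) (h : cs = pre ++ ',' :: rest) :
    ((pre.length : Int) > 0 ∧ (pre.length : Int) < (cs.length : Int) - 1 ∧
      PySem.List.slice cs (some ((pre.length : Int) - 1)) (some ((pre.length : Int) + 2))
        = ['\'', ',', '\''])
    ↔ (pre.getLast? = some '\'' ∧ rest.head? = some '\'') := by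
  rcases List.eq_nil_or_concat pre with rfl | ⟨pre', a, rfl⟩
  · simp
  · simp only [List.concat_eq_append] at h ⊢
    rcases rest with _ | ⟨r, rs⟩
    · subst h
      constructor
      · rintro ⟨-, h2, -⟩
        exfalso
        simp only [List.length_append, List.length_cons, List.length_nil] at h2
        push_cast at h2
        omega
      · rintro ⟨-, h2⟩
        exact absurd h2 (by simp)
    · subst h
      have h1 : (((pre' ++ [a]).length : Nat) : Int) - 1 = ((pre'.length : Nat) : Int) := by
        simp only [List.length_append, List.length_cons, List.length_nil]
        push_cast
        ring
      have h2 : (((pre' ++ [a]).length : Nat) : Int) + 2 = (((pre'.length + 3 : Nat)) : Int) := by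
        simp only [List.length_append, List.length_cons, List.length_nil]
        push_cast
        ring
      rw [h1, h2, PySem.List.slice_natCast]
      have hdrop : (((pre' ++ [a]) ++ ',' :: r :: rs).drop pre'.length) = a :: ',' :: r :: rs := by
        rw [List.append_assoc, List.drop_left]
        rfl
      rw [hdrop]
      have htake : (a :: ',' :: r :: rs).take (pre'.length + 3 - pre'.length) = [a, ',', r] := by
        have h3 : pre'.length + 3 - pre'.length = 3 := by omega
        rw [h3]
        rfl
      rw [htake]
      simp only [List.getLast?_concat, List.head?_cons]
      constructor
      · rintro ⟨-, -, hs⟩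
        simp only [List.cons.injEq, and_true] at hs
        exact ⟨by simp [hs.1], by simp [hs.2.2]⟩
      · rintro ⟨ha, hr⟩
        simp only [Option.some.injEq] at ha hr
        subst ha
        subst hr
        refine ⟨?_, ?_, rfl⟩ <;>
          · simp only [List.length_append, List.length_cons, List.length_nil]
            push_cast
            omega

lemma pvMain (cs : List Char) : ∀ (suf pre : List Char), cs = pre ++ suf →
    (PySem.List.enumerate suf (pre.length : Int)).flatMap (pvEmit cs)
      = pvSub pre.getLast? suf := by
  intro suf
  induction suf with
  | nil =>
    intro pre h
    simp [PySem.List.enumerate_nil, pvSub]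
  | cons c rest ih =>
    intro pre h
    rw [PySem.List.enumerate_cons, List.flatMap_cons]
    have hrec := ih (pre ++ [c]) (by rw [h, List.append_assoc]; rfl)
    simp only [List.length_append, List.length_cons, List.length_nil, Nat.cast_add,
      Nat.cast_one, zero_add, List.getLast?_concat] at hrec
    rw [hrec]
    by_cases hc : c = ','
    · subst hc
      have h' : cs = pre ++ ',' :: rest := h
      by_cases hq : pre.getLast? = some '\'' ∧ rest.head? = some '\''
      · rw [pvEmit_comma, if_pos ((pvCond cs pre rest h').mpr hq)]
        simp [pvSub, hq.1, hq.2]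
      · rw [pvEmit_comma, if_neg (fun hx => hq ((pvCond cs pre rest h').mp hx))]
        rcases not_and_or.mp hq with h1 | h1 <;> simp [pvSub, h1]
    · rw [pvEmit_other cs _ c hc]
      simp [pvSub, hc]

-- ===== VERDICT (by name: the statement is the Claim_ definition above) =====
theorem replace_comma_spec : Claim_equal_replace_comma := by
  intro s _
  unfold Spec_replace_comma replace_comma replace_comma_alt
  simp only []
  rw [show PySem.Str.len s = (s.toList.length : Int) from by simp [PySem.Str.len_eq]]
  rw [pvEmit_fold s.toList, PySem.List.foldl_append_eq_flatMap]
  have hm := pvMain s.toList s.toList [] (by simp)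
  simp only [List.length_nil, Nat.cast_zero] at hm
  rw [hm]
  rfl
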